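-- pv_equiv track=rewrite | github.com/oweninglese/vault-linker | src/infer.py | aggregate_candidates
-- ===== SOURCE A (Python) =====
-- from collections import Counter
--
-- def aggregate_candidates(items: list[tuple[str, set[str]]]) -> tuple[Counter, dict[str, list[str]]]:
--     counts: Counter = Counter()
--     examples: dict[str, list[str]] = {}
--
--     for rel, cset in items:
--         for term in cset:
--             counts[term] += 1
--             ex = examples.setdefault(term, [])
--             if len(ex) < 5:
--                 ex.append(rel)
--
--     return counts, examples
-- ===== SOURCE B (Python) =====
-- from collections import Counter
--
-- def aggregate_candidates(items):
--     counts = Counter(term for _, cset in items for term in cset)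
--     examples = {t: [rel for rel, cset in items for u in cset if u == t][:5]
--                 for t in counts}
--     return counts, examples
-- ===== Notes on version B (the rewrite author's own statement) =====
-- stated objective: alternative
-- what changed: B replaces A's single pass maintaining two dicts with capped in-loop appends by two staged passes: counts is Counter() of the flattened term stream, and examples is a dict comprehension over the counted terms that rescans all items per term and truncates to the first 5 occurrences.
import Mathlib
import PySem

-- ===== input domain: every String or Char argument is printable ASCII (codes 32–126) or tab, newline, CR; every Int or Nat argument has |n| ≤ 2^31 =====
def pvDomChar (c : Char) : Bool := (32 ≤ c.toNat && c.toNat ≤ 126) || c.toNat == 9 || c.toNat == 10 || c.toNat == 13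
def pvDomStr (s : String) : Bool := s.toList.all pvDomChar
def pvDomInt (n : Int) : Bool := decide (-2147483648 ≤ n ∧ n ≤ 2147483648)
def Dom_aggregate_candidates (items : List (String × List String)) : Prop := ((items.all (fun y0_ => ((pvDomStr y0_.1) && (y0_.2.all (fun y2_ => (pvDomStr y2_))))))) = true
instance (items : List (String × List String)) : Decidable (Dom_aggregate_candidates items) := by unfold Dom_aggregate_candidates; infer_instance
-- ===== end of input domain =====

-- B computes the same result in two staged passes — Counter() of the flattened term stream, then a
-- dict comprehension that rescans items per term and truncates to 5 — instead of A's single pass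
-- with capped in-loop appends (alternative decomposition; B does more work per distinct term).


-- ===== PORT A =====
-- one inner-loop step of A: counts[term] += 1; ex = examples.setdefault(term, []); if len(ex) < 5: ex.append(rel)
def pvStepA (st : PySem.Dict String Int × PySem.Dict String (List String)) (rel term : String) :
    PySem.Dict String Int × PySem.Dict String (List String) :=
  let counts := st.1.modify term 0 (· + 1)
  let examples := st.2.setdefault term []
  let ex := examples.getD term []
  let examples := if ex.length < 5 then examples.insert term (ex ++ [rel]) else examples
  (counts, examples)

def aggregate_candidates (items : List (String × List String)) : (List (String × Int)) × (List (String × List String)) :=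
  let res := items.foldl (fun st p => p.2.foldl (fun st term => pvStepA st p.1 term) st)
    ((PySem.Dict.empty : PySem.Dict String Int), (PySem.Dict.empty : PySem.Dict String (List String)))
  (res.1.items, res.2.items)

-- ===== PORT B =====
-- counts = Counter(term for _, cset in items for term in cset)
-- examples = {t: [rel for rel, cset in items for u in cset if u == t][:5] for t in counts}
def aggregate_candidates_alt (items : List (String × List String)) : (List (String × Int)) × (List (String × List String)) :=
  let counts := PySem.Dict.counter (items.flatMap (fun p => p.2))
  let examples := counts.keys.map (fun t =>
    (t, (items.flatMap (fun p => (p.2.filter (fun u => u == t)).map (fun _ => p.1))).take 5))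
  (counts.items, examples)

-- ===== PRECONDITION & SPEC =====
def Spec_aggregate_candidates (items : List (String × List String)) (out : (List (String × Int)) × (List (String × List String))) : Prop := out = aggregate_candidates_alt items
instance (items : List (String × List String)) (out : (List (String × Int)) × (List (String × List String))) : Decidable (Spec_aggregate_candidates items out) := by unfold Spec_aggregate_candidates; infer_instance

-- ===== CLAIM (what is proved, stated in full; the proofs are below) =====
def Claim_equal_aggregate_candidates : Prop := ∀ (items : List (String × List String)), Dom_aggregate_candidates items → Spec_aggregate_candidates items (aggregate_candidates items)

-- ===== LEMMAS AND PROOFS =====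
-- the full per-term occurrence list B's comprehension scans for
def pvOcc (items : List (String × List String)) (k : String) : List String :=
  items.flatMap (fun p => (p.2.filter (fun u => u == k)).map (fun _ => p.1))

-- A's fold, named for the proofs
def pvFoldA (items : List (String × List String)) :
    PySem.Dict String Int × PySem.Dict String (List String) :=
  items.foldl (fun st p => p.2.foldl (fun st term => pvStepA st p.1 term) st)
    ((PySem.Dict.empty : PySem.Dict String Int), (PySem.Dict.empty : PySem.Dict String (List String)))

-- counts component of the inner fold is a plain modify-fold
theorem pvInner_counts (ts : List String) (rel : String)
    (st : PySem.Dict String Int × PySem.Dict String (List String)) :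
    (ts.foldl (fun st term => pvStepA st rel term) st).1
      = ts.foldl (fun d t => d.modify t 0 (· + 1)) st.1 := by
  induction ts generalizing st with
  | nil => rfl
  | cons x xs ih => simpa [pvStepA] using ih _

-- A's counts dict IS Counter of the flattened term stream
theorem pvCounts_eq (items : List (String × List String))
    (st : PySem.Dict String Int × PySem.Dict String (List String)) :
    (items.foldl (fun st p => p.2.foldl (fun st term => pvStepA st p.1 term) st) st).1
      = (items.flatMap (fun p => p.2)).foldl (fun d t => d.modify t 0 (· + 1)) st.1 := by
  induction items generalizing st with
  | nil => rfl
  | cons x xs ih =>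
    simp only [List.foldl_cons, List.flatMap_cons, List.foldl_append]
    rw [ih, pvInner_counts]

-- one inner step keeps examples.keys = counts.keys (and nodup)
theorem pvKeys_step (st : PySem.Dict String Int × PySem.Dict String (List String))
    (rel term : String) (hk : st.2.keys = st.1.keys) (hnd : st.1.keys.Nodup) :
    (pvStepA st rel term).2.keys = (pvStepA st rel term).1.keys
      ∧ (pvStepA st rel term).1.keys.Nodup := by
  have hcont : st.2.contains term = st.1.contains term := by
    by_cases hm : term ∈ st.1.keys
    · rw [(PySem.Dict.contains_iff_mem_keys st.2 term).mpr (hk ▸ hm),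
        (PySem.Dict.contains_iff_mem_keys st.1 term).mpr hm]
    · have h1 : st.2.contains term = false := by
        by_contra hc
        exact hm (hk ▸ (PySem.Dict.contains_iff_mem_keys st.2 term).mp (by simpa using hc))
      have h2 : st.1.contains term = false := by
        by_contra hc
        exact hm ((PySem.Dict.contains_iff_mem_keys st.1 term).mp (by simpa using hc))
      rw [h1, h2]
  have hkA : (pvStepA st rel term).2.keys
      = if st.2.contains term then st.2.keys else st.2.keys ++ [term] := by
    simp only [pvStepA]
    split
    · rw [PySem.Dict.keys_insert_of_contains _ _
        (by rw [PySem.Dict.contains_setdefault]; simp), PySem.Dict.keys_setdefault]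
    · rw [PySem.Dict.keys_setdefault]
  have hkC : (pvStepA st rel term).1.keys
      = if st.1.contains term then st.1.keys else st.1.keys ++ [term] := by
    simp only [pvStepA]
    rw [PySem.Dict.keys_modify st.1 term (0 : Int) (· + 1)]
    by_cases hc : st.1.contains term
    · rw [PySem.Dict.keys_insert_of_contains _ _ hc, if_pos hc]
    · rw [PySem.Dict.keys_insert_of_not_contains _ _ (by simpa using hc), if_neg hc]
  constructor
  · rw [hkA, hkC, hcont, hk]
  · rw [hkC]
    split
    · exact hnd
    · next hc =>
      have : term ∉ st.1.keys := fun hm =>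
        hc ((PySem.Dict.contains_iff_mem_keys st.1 term).mpr hm)
      rw [List.nodup_append]
      refine ⟨hnd, List.nodup_singleton _, ?_⟩
      intro a ha b hb hab
      have hb' : b = term := by simpa using hb
      rw [hab, hb'] at ha
      exact this ha

theorem pvKeys_inner (ts : List String) (rel : String)
    (st : PySem.Dict String Int × PySem.Dict String (List String))
    (hk : st.2.keys = st.1.keys) (hnd : st.1.keys.Nodup) :
    (ts.foldl (fun st term => pvStepA st rel term) st).2.keys
        = (ts.foldl (fun st term => pvStepA st rel term) st).1.keys
      ∧ (ts.foldl (fun st term => pvStepA st rel term) st).1.keys.Nodup := by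
  induction ts generalizing st with
  | nil => exact ⟨hk, hnd⟩
  | cons x xs ih =>
    obtain ⟨h1, h2⟩ := pvKeys_step st rel x hk hnd
    exact ih _ h1 h2

-- A's capped getD after one item equals the take-5 of the full occurrence list so far
theorem pvGetD_inner (ts : List String) (rel k : String) (L : List String)
    (st : PySem.Dict String Int × PySem.Dict String (List String))
    (h : st.2.getD k [] = L.take 5) :
    (ts.foldl (fun st term => pvStepA st rel term) st).2.getD k []
      = (L ++ (ts.filter (fun u => u == k)).map (fun _ => rel)).take 5 := by
  induction ts generalizing st L with
  | nil => simpa using h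
  | cons x xs ih =>
    by_cases hxk : x = k
    · subst hxk
      have hA0 : (st.2.setdefault x ([] : List String)).getD x [] = st.2.getD x [] :=
        PySem.Dict.getD_setdefault_self st.2 x [] []
      have hstep : (pvStepA st rel x).2.getD x [] = (L ++ [rel]).take 5 := by
        simp only [pvStepA, hA0]
        split
        · next hlt =>
          have hlen : L.length < 5 := by
            rw [h] at hlt; have := List.length_take (i := 5) (l := L); omega
          rw [PySem.Dict.getD_insert_self, h, List.take_of_length_le (by omega),
            List.take_of_length_le (by simp; omega)]
        · next hge =>
          have hlen : 5 ≤ L.length := by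
            rw [h] at hge; have := List.length_take (i := 5) (l := L); omega
          rw [hA0, h, List.take_append_of_le_length hlen]
      have := ih (L ++ [rel]) (pvStepA st rel x) hstep
      simpa using this
    · have hstep : (pvStepA st rel x).2.getD k [] = st.2.getD k [] := by
        simp only [pvStepA]
        have hsd : (st.2.setdefault x ([] : List String)).getD k [] = st.2.getD k [] := by
          rw [PySem.Dict.getD_eq_get?_getD, PySem.Dict.get?_setdefault_of_ne _ _ (Ne.symm hxk),
            ← PySem.Dict.getD_eq_get?_getD]
        split
        · rw [PySem.Dict.getD_eq_get?_getD, PySem.Dict.get?_insert_of_ne _ _ (Ne.symm hxk),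
            ← PySem.Dict.getD_eq_get?_getD, hsd]
        · exact hsd
      have := ih L (pvStepA st rel x) (hstep ▸ h)
      simpa [hxk] using this

-- outer invariant: after the whole fold, keys agree, are nodup, and examples is the take-5 of pvOcc
theorem pvFoldA_inv (items : List (String × List String)) :
    (pvFoldA items).2.keys = (pvFoldA items).1.keys
      ∧ (pvFoldA items).1.keys.Nodup
      ∧ ∀ k, (pvFoldA items).2.getD k [] = (pvOcc items k).take 5 := by
  induction items using List.reverseRecOn with
  | nil =>
    exact ⟨rfl, by simp [pvFoldA, PySem.Dict.keys_empty],
      fun k => by simp [pvFoldA, pvOcc, PySem.Dict.getD_empty]⟩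
  | append_singleton xs x ih =>
    obtain ⟨hk, hnd, hv⟩ := ih
    have hfold : pvFoldA (xs ++ [x])
        = x.2.foldl (fun st term => pvStepA st x.1 term) (pvFoldA xs) := by
      simp [pvFoldA, List.foldl_append]
    obtain ⟨hk', hnd'⟩ := pvKeys_inner x.2 x.1 (pvFoldA xs) hk hnd
    refine ⟨by rw [hfold]; exact hk', by rw [hfold]; exact hnd', fun k => ?_⟩
    rw [hfold, pvGetD_inner x.2 x.1 k (pvOcc xs k) (pvFoldA xs) (hv k)]
    simp [pvOcc, List.flatMap_append]

-- ===== VERDICT (by name: the statement is the Claim_ definition above) =====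
theorem aggregate_candidates_spec : Claim_equal_aggregate_candidates := by
  intro items _
  unfold Spec_aggregate_candidates aggregate_candidates aggregate_candidates_alt
  obtain ⟨hk, hnd, hv⟩ := pvFoldA_inv items
  have hc : (pvFoldA items).1 = PySem.Dict.counter (items.flatMap (fun p => p.2)) := by
    rw [PySem.Dict.counter_eq_foldl]
    exact pvCounts_eq items _
  refine Prod.ext ?_ ?_
  · simpa using congrArg PySem.Dict.items hc
  · show (pvFoldA items).2.items = _
    have hndE : (pvFoldA items).2.keys.Nodup := by rw [hk]; exact hnd
    rw [PySem.Dict.items_eq_map_keys _ hndE ([] : List String), hk, hc]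
    exact List.map_congr_left fun k _ => by simp [hv k, pvOcc]
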